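-- pv_equiv track=rewrite | github.com/tatikonda/codewars | data_reverse.py | data_reverse
-- ===== SOURCE A (Python) =====
-- def data_reverse(data):
--     temp = []
--     res = []
--     for i in range(len(data)//8):
--         temp.append(data[i*8:(i+1)*8])
--
--     for item in temp[::-1]:
--         res += item
--     return res
-- ===== SOURCE B (Python) =====
-- def data_reverse(data):
--     n = len(data) // 8
--     tr = data[:n*8][::-1]
--     res = []
--     for i in range(n):
--         res += tr[i*8:i*8+8][::-1]
--     return res
-- ===== Notes on version B (the rewrite author's own statement) =====
-- stated objective: alternative
-- what changed: Instead of collecting the forward 8-chunks in a temp list and concatenating them in reverse, B reverses the truncated prefix once and then un-reverses each 8-block while scanning forward, so no intermediate list of chunks is ever built.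
import Mathlib
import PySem

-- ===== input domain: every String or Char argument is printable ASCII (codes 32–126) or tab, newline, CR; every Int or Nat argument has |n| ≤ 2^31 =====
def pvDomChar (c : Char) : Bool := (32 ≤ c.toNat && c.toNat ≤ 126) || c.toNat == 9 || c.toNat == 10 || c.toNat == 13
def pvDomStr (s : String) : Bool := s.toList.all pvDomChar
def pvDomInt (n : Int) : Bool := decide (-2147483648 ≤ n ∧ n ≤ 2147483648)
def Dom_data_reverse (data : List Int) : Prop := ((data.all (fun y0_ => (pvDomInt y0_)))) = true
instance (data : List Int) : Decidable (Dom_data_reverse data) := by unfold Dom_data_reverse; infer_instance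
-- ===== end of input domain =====

-- B reverses the truncated prefix once and un-reverses each 8-block while scanning forward,
-- instead of A's intermediate list of forward chunks concatenated in reverse (objective: alternative).

-- ===== PORT A =====
def data_reverse (data : List Int) : List Int :=
  -- temp.append(data[i*8:(i+1)*8]) for i in range(len(data)//8)
  let temp : List (List Int) :=
    (PySem.List.pyRange 0 (PySem.Int.floordiv (data.length : Int) 8) 1).foldl
      (fun temp i => temp ++ [PySem.List.slice data (some (i*8)) (some ((i+1)*8))]) []
  -- for item in temp[::-1]: res += item   (temp[::-1] is temp.reverse, PySem.List.slice?_none_none_neg_one)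
  temp.reverse.foldl (fun res item => res ++ item) []

-- ===== PORT B =====
def data_reverse_alt (data : List Int) : List Int :=
  let n : Int := PySem.Int.floordiv (data.length : Int) 8
  -- tr = data[:n*8][::-1]   (the [::-1] is reverse, PySem.List.slice?_none_none_neg_one)
  let tr : List Int := (PySem.List.slice data none (some (n*8))).reverse
  -- for i in range(n): res += tr[i*8:i*8+8][::-1]
  (PySem.List.pyRange 0 n 1).foldl
    (fun res i => res ++ (PySem.List.slice tr (some (i*8)) (some (i*8+8))).reverse) []

-- ===== PRECONDITION & SPEC =====
def Spec_data_reverse (data : List Int) (out : List Int) : Prop := out = data_reverse_alt data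
instance (data : List Int) (out : List Int) : Decidable (Spec_data_reverse data out) := by unfold Spec_data_reverse; infer_instance

-- ===== CLAIM (what is proved, stated in full; the proofs are below) =====
def Claim_equal_data_reverse : Prop := ∀ (data : List Int), Dom_data_reverse data → Spec_data_reverse data (data_reverse data)

-- ===== LEMMAS AND PROOFS =====

-- reversing (List.range n) is the same as mapping k ↦ n-1-k over it
lemma map_reverse_range {α : Type} (c : Nat → α) (n : Nat) :
    (List.range n).reverse.map c = (List.range n).map (fun k => c (n-1-k)) := by
  induction n generalizing c with
  | zero => simp
  | succ m ih =>
    conv_lhs => rw [List.range_succ]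
    conv_rhs => rw [List.range_succ_eq_map]
    simp only [List.reverse_append, List.reverse_cons, List.reverse_nil, List.nil_append,
      List.map_cons, List.cons_append, List.map_map]
    rw [ih]
    refine congrArg₂ List.cons (by norm_num) ?_
    apply List.map_congr_left
    intro k _
    simp only [Function.comp]
    congr 1
    omega

-- un-reversing the k-th 8-block of the reversed truncated prefix yields the mirror chunk
lemma rev_block (data : List Int) (n k : Nat) (hk : k < n) (hn : n * 8 ≤ data.length) :
    ((((data.take (n*8)).reverse.drop (k*8)).take 8)).reverse
      = (data.drop ((n-1-k)*8)).take 8 := by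
  rw [List.drop_reverse, List.take_reverse, List.reverse_reverse]
  rw [List.length_take, List.length_take]
  rw [List.drop_take, List.drop_take]
  have h1 : min (n*8) data.length = n*8 := by omega
  rw [h1]
  have h2 : min (n*8 - k*8) (n*8) = n*8 - k*8 := by omega
  rw [h2, List.take_take]
  congr 1
  · omega
  · congr 1; omega

-- ===== VERDICT (by name: the statement is the Claim_ definition above) =====
theorem data_reverse_spec : Claim_equal_data_reverse := by
  intro data _
  unfold Spec_data_reverse data_reverse data_reverse_alt
  have hfd : PySem.Int.floordiv (data.length : Int) 8 = ((data.length/8 : Nat) : Int) :=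
    PySem.Int.floordiv_natCast data.length 8
  set n := data.length / 8 with hn
  have hn8 : n * 8 ≤ data.length := by omega
  simp only [hfd, PySem.List.pyRange_one, List.foldl_map,
    PySem.List.foldl_append_singleton_eq_map, PySem.List.foldl_append_eq_flatMap,
    List.nil_append]
  rw [show (fun (res item : List Int) => res ++ item) = (fun res item => res ++ id item) from rfl,
    PySem.List.foldl_append_eq_flatMap, List.nil_append]
  simp only [Int.sub_zero, Int.toNat_natCast, zero_add, List.flatMap_id]
  -- A's chunks: data[k*8:(k+1)*8] = take 8 (drop (k*8) data)
  have hA : ∀ k : Nat, k < n →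
      PySem.List.slice data (some ((k:Int)*8)) (some (((k:Int)+1)*8))
        = (data.drop (k*8)).take 8 := by
    intro k hk
    have e1 : ((k:Int))*8 = ((k*8 : Nat) : Int) := by push_cast; ring
    have e2 : (((k:Int))+1)*8 = ((k*8+8 : Nat) : Int) := by push_cast; ring
    rw [e1, e2, PySem.List.slice_natCast]
    congr 1
    omega
  -- B's blocks: tr[k*8:k*8+8][::-1] = A's chunk n-1-k
  have hB : ∀ k : Nat, k < n →
      (PySem.List.slice ((PySem.List.slice data none (some ((n:Int)*8))).reverse)
        (some ((k:Int)*8)) (some ((k:Int)*8+8))).reverse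
        = (data.drop ((n-1-k)*8)).take 8 := by
    intro k hk
    have e0 : ((n:Int))*8 = ((n*8 : Nat) : Int) := by push_cast; ring
    have e1 : ((k:Int))*8 = ((k*8 : Nat) : Int) := by push_cast; ring
    have e2 : ((k:Int))*8+8 = ((k*8 : Nat) : Int) + ((8:Nat) : Int) := by push_cast; ring
    rw [e0, PySem.List.slice_to_natCast, e2, e1, PySem.List.slice_natCast_add]
    exact rev_block data n k hk hn8
  rw [List.map_congr_left (fun k hk => hA k (by simpa using List.mem_range.mp hk)),
    ← List.map_reverse, map_reverse_range]
  rw [List.flatMap_def]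
  congr 1
  apply List.map_congr_left
  intro k hk
  exact (hB k (List.mem_range.mp hk)).symm
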